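-- pv_equiv track=rewrite | github.com/Radomir21/2024-Cryptanalysis | Lab_2/lab_2.py | affine_encrypt_bigram
-- ===== SOURCE A (Python) =====
-- import math
--
-- def affine_encrypt_bigram(text, a, b, alphabet):
--     if math.gcd(a, len(alphabet) ** 2) != 1:
--         raise ValueError("Параметр 'a' должен быть взаимно простым с квадратом длины алфавита.")
--
--     bigram_alphabet = [a + b for a in alphabet for b in alphabet]
--     encrypted_text = ''
--
--     for i in range(0, len(text) - 1, 2):
--         bigram = text[i:i + 2]
--         if bigram in bigram_alphabet:
--             index = bigram_alphabet.index(bigram)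
--             encrypted_index = (a * index + b) % len(bigram_alphabet)
--             encrypted_text += bigram_alphabet[encrypted_index]
--         else:
--             encrypted_text += bigram
--     return encrypted_text
-- ===== SOURCE B (Python) =====
-- import math
--
-- def affine_encrypt_bigram(text, a, b, alphabet):
--     m = len(alphabet)
--     if math.gcd(a, m * m) != 1:
--         raise ValueError("Параметр 'a' должен быть взаимно простым с квадратом длины алфавита.")
--     pos = {}
--     for i, c in enumerate(alphabet):
--         if c not in pos:
--             pos[c] = i
--     out = []
--     i = 0
--     n = len(text)
--     while i + 1 < n:
--         c1 = text[i]
--         c2 = text[i + 1]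
--         p1 = pos.get(c1)
--         p2 = pos.get(c2)
--         if p1 is not None and p2 is not None:
--             e = (a * (p1 * m + p2) + b) % (m * m)
--             out.append(alphabet[e // m] + alphabet[e % m])
--         else:
--             out.append(c1 + c2)
--         i += 2
--     return ''.join(out)
-- ===== Notes on version B (the rewrite author's own statement) =====
-- stated objective: faster
-- what changed: B drops A's m*m-element bigram table (linear membership test, list.index scan and table lookup per bigram) and instead precomputes a first-index dictionary of the alphabet once, computing each bigram's code and the encrypted pair by positional arithmetic (index = pos[c1]*m + pos[c2]; output alphabet[e//m] + alphabet[e%m]) in a while-loop that joins collected chunks.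
import Mathlib
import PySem

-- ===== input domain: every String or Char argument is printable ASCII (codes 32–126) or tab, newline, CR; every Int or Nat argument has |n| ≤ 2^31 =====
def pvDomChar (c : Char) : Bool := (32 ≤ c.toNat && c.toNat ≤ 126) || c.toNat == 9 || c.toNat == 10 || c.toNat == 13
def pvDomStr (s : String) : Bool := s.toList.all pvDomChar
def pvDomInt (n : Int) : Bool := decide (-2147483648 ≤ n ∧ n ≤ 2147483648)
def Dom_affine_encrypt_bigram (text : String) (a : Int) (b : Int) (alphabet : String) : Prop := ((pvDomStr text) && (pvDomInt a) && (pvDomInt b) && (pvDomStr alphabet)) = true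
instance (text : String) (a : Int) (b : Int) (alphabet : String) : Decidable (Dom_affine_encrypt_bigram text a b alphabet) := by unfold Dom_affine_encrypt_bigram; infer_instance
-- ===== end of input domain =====

-- B replaces A's bigram table (built, then linearly searched and indexed per bigram) by direct
-- positional arithmetic over a first-index dictionary of the alphabet; objective: faster.

-- ===== PORT A =====
-- bigram_alphabet = [a + b for a in alphabet for b in alphabet]
def pvBigrams (al : List Char) : List (List Char) :=
  al.flatMap (fun x => al.map (fun y => [x, y]))

-- the body of A's for-loop (one bigram step)
def pvStepA (a b : Int) (al tl : List Char) (acc : List Char) (i : Int) : List Char :=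
  let bigram := PySem.List.slice tl (some i) (some (i + 2))
  if (pvBigrams al).contains bigram then
    let idx : Nat := (PySem.List.index? (pvBigrams al) bigram).getD 0
    acc ++ PySem.List.pyGetD (pvBigrams al)
      (PySem.Int.mod (a * (idx : Int) + b) (((pvBigrams al).length : Int))) []
  else acc ++ bigram

def affine_encrypt_bigram (text : String) (a : Int) (b : Int) (alphabet : String) : String :=
  -- Python raises ValueError on this branch; Pre_ excludes those inputs
  if Int.gcd a ((alphabet.toList.length : Int) ^ 2) ≠ 1 then ""
  else
    let tl := text.toList
    String.ofList ((PySem.List.pyRange 0 ((tl.length : Int) - 1) 2).foldl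
      (pvStepA a b alphabet.toList tl) [])

-- ===== PORT B =====
-- pos = {} ; for i, c in enumerate(alphabet): if c not in pos: pos[c] = i
def pvPos (al : List Char) : PySem.Dict Char Int :=
  (PySem.List.enumerate al 0).foldl
    (fun d p => if d.contains p.2 then d else d.insert p.2 p.1) PySem.Dict.empty

-- one iteration of B's while-loop: the 2-char chunk appended to out
def pvEntryB (a b m : Int) (al : List Char) (pos : PySem.Dict Char Int) (c1 c2 : Char) : List Char :=
  match pos.get? c1, pos.get? c2 with
  | some p1, some p2 =>
      let e := PySem.Int.mod (a * (p1 * m + p2) + b) (m * m)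
      [PySem.List.pyGetD al (PySem.Int.floordiv e m) ' ',
       PySem.List.pyGetD al (PySem.Int.mod e m) ' ']
  | _, _ => [c1, c2]

-- while i + 1 < n: out.append(entry); i += 2
def pvAltLoop (a b m : Int) (al : List Char) (pos : PySem.Dict Char Int)
    (tl : List Char) (n : Int) (i : Int) : List (List Char) :=
  if i + 1 < n then
    pvEntryB a b m al pos (PySem.List.pyGetD tl i ' ') (PySem.List.pyGetD tl (i + 1) ' ')
      :: pvAltLoop a b m al pos tl n (i + 2)
  else []
termination_by (n - i).toNat
decreasing_by omega

def affine_encrypt_bigram_alt (text : String) (a : Int) (b : Int) (alphabet : String) : String :=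
  let al := alphabet.toList
  let m : Int := (al.length : Int)
  if Int.gcd a (m * m) ≠ 1 then ""
  else
    let tl := text.toList
    String.ofList (pvAltLoop a b m al (pvPos al) tl (tl.length : Int) 0).flatten

-- ===== PRECONDITION & SPEC =====
-- Pre_ excludes exactly the inputs where Python A raises ValueError (gcd(a, len(alphabet)**2) != 1).
def Pre_affine_encrypt_bigram (text : String) (a : Int) (b : Int) (alphabet : String) : Prop :=
  Int.gcd a ((alphabet.toList.length : Int) ^ 2) = 1
instance (text : String) (a : Int) (b : Int) (alphabet : String) : Decidable (Pre_affine_encrypt_bigram text a b alphabet) := by unfold Pre_affine_encrypt_bigram; infer_instance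

def pvWitness_affine_encrypt_bigram : String × Int × Int × String := ("abba!", 3, 5, "ab")

def Spec_affine_encrypt_bigram (text : String) (a : Int) (b : Int) (alphabet : String) (out : String) : Prop := out = affine_encrypt_bigram_alt text a b alphabet
instance (text : String) (a : Int) (b : Int) (alphabet : String) (out : String) : Decidable (Spec_affine_encrypt_bigram text a b alphabet out) := by unfold Spec_affine_encrypt_bigram; infer_instance

-- ===== CLAIM (what is proved, stated in full; the proofs are below) =====
def Claim_equal_affine_encrypt_bigram : Prop := ∀ (text : String) (a : Int) (b : Int) (alphabet : String), Dom_affine_encrypt_bigram text a b alphabet → Pre_affine_encrypt_bigram text a b alphabet → Spec_affine_encrypt_bigram text a b alphabet (affine_encrypt_bigram text a b alphabet)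

-- ===== LEMMAS AND PROOFS =====

theorem pv_bg_length (al : List Char) : (pvBigrams al).length = al.length * al.length := by
  simp [pvBigrams]

theorem pv_bg_mem (al : List Char) (c1 c2 : Char) :
    [c1, c2] ∈ pvBigrams al ↔ c1 ∈ al ∧ c2 ∈ al := by
  simp [pvBigrams]

theorem pv_index?_map_pair (al : List Char) (x c2 : Char) :
    PySem.List.index? (al.map (fun y => [x, y])) [x, c2] = PySem.List.index? al c2 := by
  induction al with
  | nil => rfl
  | cons z zs ih =>
    by_cases hz : z = c2
    · subst hz
      rw [List.map_cons, PySem.List.index?_cons_self, PySem.List.index?_cons_self]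
    · rw [List.map_cons, PySem.List.index?_cons_of_ne _ (by simp [hz]),
        PySem.List.index?_cons_of_ne _ hz, ih]

theorem pv_index?_append_of_not_mem {α : Type} [BEq α] [LawfulBEq α] (l t : List α) (v : α)
    (h : v ∉ l) :
    PySem.List.index? (l ++ t) v = (PySem.List.index? t v).map (fun k => l.length + k) := by
  induction l with
  | nil => simp
  | cons z zs ih =>
    simp only [List.mem_cons, not_or] at h
    rw [List.cons_append, PySem.List.index?_cons_of_ne _ (fun e => h.1 e.symm),
      ih h.2, Option.map_map]
    congr 1
    funext k
    simp; omega

theorem pv_index?_bg (o al : List Char) (c1 c2 : Char) (i1 i2 : Nat)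
    (h1 : PySem.List.index? o c1 = some i1) (h2 : PySem.List.index? al c2 = some i2) :
    PySem.List.index? (o.flatMap (fun x => al.map (fun y => [x, y]))) [c1, c2]
      = some (i1 * al.length + i2) := by
  induction o generalizing i1 with
  | nil => simp [PySem.List.index?] at h1
  | cons x o' ih =>
    rw [List.flatMap_cons]
    by_cases hx : x = c1
    · subst hx
      rw [PySem.List.index?_cons_self] at h1
      obtain rfl : i1 = 0 := by simpa using h1.symm
      have hmem : [x, c2] ∈ al.map (fun y => [x, y]) := by
        have : c2 ∈ al := (PySem.List.index?_isSome_iff al c2).1 (by rw [h2]; rfl)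
        simp only [List.mem_map]
        exact ⟨c2, this, rfl⟩
      rw [PySem.List.index?_append_of_mem _ hmem, pv_index?_map_pair, h2]
      simp
    · have hnm : [c1, c2] ∉ al.map (fun y => [x, y]) := by
        simp only [List.mem_map, not_exists]
        rintro y ⟨-, hy⟩
        have := congrArg (fun l => l.head?) hy
        simp at this
        exact hx this
      rw [PySem.List.index?_cons_of_ne _ hx] at h1
      match hh : PySem.List.index? o' c1 with
      | none => rw [hh] at h1; simp at h1
      | some j =>
        rw [hh] at h1
        obtain rfl : i1 = j + 1 := by simpa using h1.symm
        rw [pv_index?_append_of_not_mem _ _ _ hnm, ih j hh]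
        simp only [Option.map_some, List.length_map]
        congr 1
        ring

theorem pv_getD_bg (o al : List Char) (q r : Nat) (hq : q < o.length) (hr : r < al.length) :
    (o.flatMap (fun x => al.map (fun y => [x, y]))).getD (q * al.length + r) []
      = [o.getD q ' ', al.getD r ' '] := by
  induction o generalizing q with
  | nil => simp at hq
  | cons x o' ih =>
    rw [List.flatMap_cons]
    match q with
    | 0 =>
      rw [List.getD_append _ _ _ _ (by simpa using hr)]
      simp only [Nat.zero_mul, Nat.zero_add]
      simp [List.getD, List.getElem?_map, List.getElem?_eq_getElem hr]
    | q' + 1 =>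
      rw [List.getD_append_right _ _ _ _ (by simp [Nat.succ_mul]; omega)]
      have : (q' + 1) * al.length + r - (al.map (fun y => [x, y])).length
          = q' * al.length + r := by simp [Nat.succ_mul]; omega
      rw [this, ih q' (by simp at hq; omega)]
      rfl

theorem pv_pos_get (al : List Char) (c : Char) (k : Int) (d : PySem.Dict Char Int) :
    PySem.Dict.get? ((PySem.List.enumerate al k).foldl
        (fun d p => if d.contains p.2 then d else d.insert p.2 p.1) d) c
      = if (d.get? c).isSome then d.get? c
        else (PySem.List.index? al c).map (fun j : Nat => k + (j : Int)) := by
  induction al generalizing k d with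
  | nil =>
    simp only [PySem.List.enumerate, List.foldl_nil]
    cases h : d.get? c <;> simp [PySem.List.index?, h]
  | cons x al' ih =>
    simp only [PySem.List.enumerate, List.foldl_cons]
    rw [ih]
    by_cases hx : x = c
    · subst hx
      by_cases hc : d.contains x = true
      · have hs : (d.get? x).isSome := by rw [← PySem.Dict.contains_eq_isSome_get?]; exact hc
        simp [hc, hs]
      · have hs : d.get? x = none := by
          have := PySem.Dict.contains_eq_isSome_get? d x
          simp [hc] at this
          exact Option.eq_none_iff_forall_ne_some.2 (by
            intro v hv; rw [hv] at this; simp at this)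
        simp only [if_neg (by simp [hc] : ¬ d.contains x = true)]
        rw [PySem.Dict.get?_insert_self, PySem.List.index?_cons_self]
        simp [hs]
    · have hne : c ≠ x := fun e => hx e.symm
      by_cases hc : d.contains x = true
      · simp only [hc, if_pos]
        rw [PySem.List.index?_cons_of_ne _ hx, Option.map_map]
        cases h : d.get? c <;> simp [h] <;> congr 1 <;> funext j <;> simp <;> ring
      · simp only [if_neg (by simp [hc] : ¬ d.contains x = true)]
        rw [PySem.Dict.get?_insert_of_ne _ _ hne]
        rw [PySem.List.index?_cons_of_ne _ hx, Option.map_map]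
        cases h : d.get? c <;> simp [h] <;> congr 1 <;> funext j <;> simp <;> ring

theorem pv_pos_get_empty (al : List Char) (c : Char) :
    (pvPos al).get? c = (PySem.List.index? al c).map (fun j : Nat => (j : Int)) := by
  rw [pvPos, pv_pos_get]
  simp

theorem pv_pyRange_two_cons (a b : Int) (h : a < b) :
    PySem.List.pyRange a b 2 = a :: PySem.List.pyRange (a + 2) b 2 := by
  rw [PySem.List.pyRange_of_pos _ _ (by norm_num : (0:Int) < 2),
    PySem.List.pyRange_of_pos _ _ (by norm_num : (0:Int) < 2)]
  rw [if_pos h]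
  by_cases h2 : a + 2 < b
  · rw [if_pos h2,
      show ((b - a + 2 - 1) / 2).toNat = ((b - (a + 2) + 2 - 1) / 2).toNat + 1 by omega,
      List.range_succ_eq_map]
    simp only [List.map_cons, Nat.cast_zero, mul_zero, add_zero, List.map_map]
    congr 1
    apply List.map_congr_left
    intro k _
    simp only [Function.comp_apply]
    push_cast
    ring
  · rw [if_neg h2, show ((b - a + 2 - 1) / 2).toNat = 1 by omega]
    simp [List.range_one]

theorem pv_step (a b : Int) (al tl : List Char) (acc : List Char) (i : Int)
    (h0 : 0 ≤ i) (h1 : i + 1 < (tl.length : Int)) :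
    pvStepA a b al tl acc i
      = acc ++ pvEntryB a b (al.length : Int) al (pvPos al)
          (PySem.List.pyGetD tl i ' ') (PySem.List.pyGetD tl (i + 1) ' ') := by
  have hj : i.toNat < tl.length := by omega
  have hj1 : i.toNat + 1 < tl.length := by omega
  have hslice : PySem.List.slice tl (some i) (some (i + 2)) = [tl[i.toNat], tl[i.toNat + 1]] := by
    rw [PySem.List.slice_toNat _ h0 (by omega), show (i + 2).toNat - i.toNat = 2 by omega,
      List.drop_eq_getElem_cons hj, List.drop_eq_getElem_cons hj1]
    rfl
  have hc1 : PySem.List.pyGetD tl i ' ' = tl[i.toNat] := PySem.List.pyGetD_eq_getElem _ _ h0 (by omega)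
  have hc2 : PySem.List.pyGetD tl (i + 1) ' ' = tl[i.toNat + 1] := by
    rw [PySem.List.pyGetD_eq_getElem _ _ (by omega) (by push_cast; omega)]
    congr 1
    omega
  set c1 := tl[i.toNat] with hc1'
  set c2 := tl[i.toNat + 1] with hc2'
  rw [pvStepA, hslice, hc1, hc2, pvEntryB, pv_pos_get_empty, pv_pos_get_empty]
  match e1 : PySem.List.index? al c1, e2 : PySem.List.index? al c2 with
  | some i1, some i2 =>
    have hm1 : c1 ∈ al := (PySem.List.index?_isSome_iff al c1).1 (by rw [e1]; rfl)
    have hm2 : c2 ∈ al := (PySem.List.index?_isSome_iff al c2).1 (by rw [e2]; rfl)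
    have hM : 0 < al.length := List.length_pos_of_mem hm1
    have hcontains : (pvBigrams al).contains [c1, c2] = true := by
      simpa using (pv_bg_mem al c1 c2).2 ⟨hm1, hm2⟩
    have hidx : PySem.List.index? (pvBigrams al) [c1, c2] = some (i1 * al.length + i2) := by
      rw [pvBigrams]; exact pv_index?_bg al al c1 c2 i1 i2 e1 e2
    rw [if_pos hcontains, hidx]
    simp only [Option.map_some, Option.getD_some]
    have hMM : (0:Int) < (al.length : Int) * (al.length : Int) := by positivity
    set e := PySem.Int.mod (a * ((i1 : Int) * (al.length : Int) + (i2 : Int)) + b)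
      ((al.length : Int) * (al.length : Int)) with he
    have hEa : PySem.Int.mod (a * ((i1 * al.length + i2 : Nat) : Int) + b)
        (((pvBigrams al).length : Int)) = e := by
      rw [pv_bg_length]
      push_cast
      rfl
    rw [hEa]
    have he0 : 0 ≤ e := PySem.Int.mod_nonneg _ hMM
    have heM : e < (al.length : Int) * (al.length : Int) := PySem.Int.mod_lt _ hMM
    have heN : e.toNat < al.length * al.length := by
      have := heM; omega
    -- A's lookup in the bigram table
    have hlen : (e.toNat : Int) < ((pvBigrams al).length : Int) := by
      rw [pv_bg_length]; push_cast; omega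
    have hA : PySem.List.pyGetD (pvBigrams al) e [] = (pvBigrams al).getD e.toNat [] := by
      rw [PySem.List.pyGetD_eq_getElem _ _ he0 (by rw [pv_bg_length]; push_cast; omega),
        List.getD_eq_getElem _ _ (by rw [pv_bg_length]; omega)]
    have hq : e.toNat / al.length < al.length := Nat.div_lt_of_lt_mul (by omega)
    have hr : e.toNat % al.length < al.length := Nat.mod_lt _ hM
    have hsplit : e.toNat / al.length * al.length + e.toNat % al.length = e.toNat := by
      rw [Nat.mul_comm]; exact Nat.div_add_mod e.toNat al.length
    rw [hA, pvBigrams, show e.toNat = e.toNat / al.length * al.length + e.toNat % al.length by omega,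
      pv_getD_bg al al _ _ hq hr]
    -- B's two lookups
    have heB : e = ((e.toNat : Nat) : Int) := by omega
    rw [heB, PySem.Int.floordiv_natCast, PySem.Int.mod_natCast,
      PySem.List.pyGetD_natCast, PySem.List.pyGetD_natCast]
    simp only [Int.toNat_natCast]
  | some i1, none =>
    have hm2 : c2 ∉ al := (PySem.List.index?_eq_none_iff al c2).1 e2
    rw [if_neg (by simp [pv_bg_mem al c1 c2, hm2])]
    simp
  | none, _ =>
    have hm1 : c1 ∉ al := (PySem.List.index?_eq_none_iff al c1).1 e1
    rw [if_neg (by simp [pv_bg_mem al c1 c2, hm1])]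
    simp

theorem pv_loop (a b : Int) (al tl : List Char) :
    ∀ (fuel : Nat) (i : Int) (acc : List Char), 0 ≤ i → ((tl.length : Int) - i).toNat ≤ fuel →
    (PySem.List.pyRange i ((tl.length : Int) - 1) 2).foldl (pvStepA a b al tl) acc
      = acc ++ (pvAltLoop a b (al.length : Int) al (pvPos al) tl (tl.length : Int) i).flatten := by
  intro fuel
  induction fuel with
  | zero =>
    intro i acc h0 hf
    rw [pvAltLoop, if_neg (by omega),
      PySem.List.pyRange_of_pos _ _ (by norm_num : (0:Int) < 2), if_neg (by omega)]
    simp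
  | succ fuel ih =>
    intro i acc h0 hf
    by_cases h1 : i + 1 < (tl.length : Int)
    · rw [pv_pyRange_two_cons _ _ (by omega), List.foldl_cons, pv_step a b al tl acc i h0 h1,
        pvAltLoop, if_pos h1, List.flatten_cons, ih (i + 2) _ (by omega) (by omega)]
      rw [List.append_assoc]
    · rw [pvAltLoop, if_neg h1,
        PySem.List.pyRange_of_pos _ _ (by norm_num : (0:Int) < 2), if_neg (by omega)]
      simp

-- ===== VERDICT (by name: the statement is the Claim_ definition above) =====
theorem affine_encrypt_bigram_spec : Claim_equal_affine_encrypt_bigram := by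
  intro text a b alphabet _hDom hPre
  unfold Spec_affine_encrypt_bigram affine_encrypt_bigram affine_encrypt_bigram_alt
  rw [Pre_affine_encrypt_bigram] at hPre
  have hsq : ((alphabet.toList.length : Int)) * (alphabet.toList.length : Int)
      = ((alphabet.toList.length : Int)) ^ 2 := (sq _).symm
  simp only [hsq, hPre]
  rw [if_neg (by simp), if_neg (by simp)]
  have := pv_loop a b alphabet.toList text.toList text.toList.length 0 [] le_rfl (by omega)
  rw [this]
  rfl
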